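-- pv_equiv track=rewrite | github.com/AoC2021Albert/AoC2023 | 12/12.py | get_seqs_from_springs
-- ===== SOURCE A (Python) =====
-- def get_seqs_from_springs(springs):
--     seqs = []
--     seq = ''
--     for c in springs:
--         if c == '.':
--             if seq:
--                 seqs.append(seq)
--             seq = ''
--         else:
--             seq += c
--     if seq:
--         seqs.append(seq)
--     return (seqs)
-- ===== SOURCE B (Python) =====
-- def get_seqs_from_springs(springs):
--     return [s for s in springs.split('.') if s]
-- ===== Notes on version B (the rewrite author's own statement) =====
-- stated objective: idiomatic
-- what changed: Replaces the per-character accumulator state machine (which flushes the current run on each '.') with a single library split('.') followed by filtering out the empty segments.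
import Mathlib
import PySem

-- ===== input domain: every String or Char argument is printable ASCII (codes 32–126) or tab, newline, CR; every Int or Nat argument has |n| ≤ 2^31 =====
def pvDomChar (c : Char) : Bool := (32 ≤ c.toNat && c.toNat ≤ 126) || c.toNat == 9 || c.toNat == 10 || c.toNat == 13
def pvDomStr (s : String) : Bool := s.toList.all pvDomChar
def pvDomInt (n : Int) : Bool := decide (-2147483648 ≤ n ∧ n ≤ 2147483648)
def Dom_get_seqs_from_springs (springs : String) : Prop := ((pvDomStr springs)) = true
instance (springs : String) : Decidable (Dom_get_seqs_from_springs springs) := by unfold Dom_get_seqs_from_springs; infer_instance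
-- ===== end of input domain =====

-- B replaces A's per-character accumulator loop with split('.') + filter of empty segments (idiomatic; same cost).

-- ===== PORT A =====
-- the loop of A: state (seqs, seq), flush seq on '.', append the char otherwise, final flush
def getSeqsLoop (seqs : List (List Char)) (seq : List Char) : List Char → List (List Char)
  | [] => if seq ≠ [] then seqs ++ [seq] else seqs
  | c :: rest =>
      if c = '.' then getSeqsLoop (if seq ≠ [] then seqs ++ [seq] else seqs) [] rest
      else getSeqsLoop seqs (seq ++ [c]) rest

def get_seqs_from_springs (springs : String) : List String :=
  (getSeqsLoop [] [] springs.toList).map String.ofList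

-- ===== PORT B =====
-- Source B: [s for s in springs.split('.') if s]
def get_seqs_from_springs_alt (springs : String) : List String :=
  (((PySem.Chars.splitOn springs.toList ['.']).filter (fun cs => cs ≠ [])).map String.ofList)

-- ===== PRECONDITION & SPEC =====
def Spec_get_seqs_from_springs (springs : String) (out : List String) : Prop := out = get_seqs_from_springs_alt springs
instance (springs : String) (out : List String) : Decidable (Spec_get_seqs_from_springs springs out) := by unfold Spec_get_seqs_from_springs; infer_instance

-- ===== CLAIM (what is proved, stated in full; the proofs are below) =====
def Claim_equal_get_seqs_from_springs : Prop := ∀ (springs : String), Dom_get_seqs_from_springs springs → Spec_get_seqs_from_springs springs (get_seqs_from_springs springs)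

-- ===== LEMMAS AND PROOFS =====

-- common reference function: split at dots, cur is the segment being built
def splitDots (cur : List Char) : List Char → List (List Char)
  | [] => [cur]
  | c :: rest => if c = '.' then cur :: splitDots [] rest else splitDots (cur ++ [c]) rest

theorem splitOn_go_eq (l : List Char) : ∀ (fuel : Nat) (cur : List Char) (acc : List (List Char)),
    l.length < fuel →
    PySem.Chars.splitOn.go ['.'] fuel l cur acc = acc.reverse ++ splitDots cur.reverse l := by
  induction l with
  | nil =>
      intro fuel cur acc h
      match fuel, h with
      | fuel + 1, _ =>
        simp [PySem.Chars.splitOn.go, splitDots]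
  | cons c rest ih =>
      intro fuel cur acc h
      match fuel, h with
      | fuel + 1, h =>
        rw [PySem.Chars.splitOn.go]
        by_cases hc : c = '.'
        · subst hc
          simp only [if_pos (by simp : (['.'].isPrefixOf ('.' :: rest)) = true)]
          simp only [List.length_singleton, List.drop_succ_cons, List.drop_zero]
          rw [ih fuel [] (cur.reverse :: acc) (by simp at h; omega)]
          simp [splitDots]
        · have hpre : (['.'].isPrefixOf (c :: rest)) = false := by
            simp [List.isPrefixOf]
            exact fun h' => hc h'.symm
          simp only [hpre, Bool.false_eq_true, if_false]
          rw [ih fuel (c :: cur) acc (by simp at h ⊢; omega)]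
          simp [splitDots, hc]

theorem splitOn_eq_splitDots (l : List Char) :
    PySem.Chars.splitOn l ['.'] = splitDots [] l := by
  rw [PySem.Chars.splitOn, splitOn_go_eq l (l.length + 1) [] [] (by omega)]
  simp

theorem getSeqsLoop_eq (l : List Char) : ∀ (seqs : List (List Char)) (seq : List Char),
    getSeqsLoop seqs seq l = seqs ++ (splitDots seq l).filter (fun cs => cs ≠ []) := by
  induction l with
  | nil =>
      intro seqs seq
      by_cases h : seq = [] <;> simp [getSeqsLoop, splitDots, h]
  | cons c rest ih =>
      intro seqs seq
      by_cases hc : c = '.'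
      · subst hc
        simp only [getSeqsLoop, splitDots]
        rw [ih]
        by_cases h : seq = [] <;> simp [h]
      · simp only [getSeqsLoop, if_neg hc, splitDots]
        rw [ih]

-- ===== VERDICT (by name: the statement is the Claim_ definition above) =====
theorem get_seqs_from_springs_spec : Claim_equal_get_seqs_from_springs := by
  intro springs _
  unfold Spec_get_seqs_from_springs get_seqs_from_springs get_seqs_from_springs_alt
  rw [splitOn_eq_splitDots, getSeqsLoop_eq]
  simp
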